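-- pv_equiv track=rewrite | github.com/darrendavidprice/science-discovery | SM-sandbox/proj5.4-EFT-Density-Estimation/backends/plot.py | assert_good_bins_format
-- ===== SOURCE A (Python) =====
-- def assert_good_bins_format (bins) :
--     assert len(bins) > 1
--     assert bins[0] != bins[1]
--     do_ascending = True if bins[1] > bins[0] else False
--     last_bin = bins[0]
--     for b in bins[1:] :
--         if do_ascending :
--             assert b > last_bin
--         else :
--             assert b < last_bin
--         last_bin = b
--     return True
-- ===== SOURCE B (Python) =====
-- def assert_good_bins_format(bins):
--     assert len(bins) > 1
--     assert bins[0] != bins[1]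
--     seq = list(bins)
--     distinct = len(set(seq)) == len(seq)
--     if bins[1] > bins[0]:
--         assert distinct and seq == sorted(seq)
--     else:
--         assert distinct and seq == sorted(seq, reverse=True)
--     return True
-- ===== Notes on version B (the rewrite author's own statement) =====
-- stated objective: idiomatic
-- what changed: The direction-fixed single scan with a running last_bin is replaced by a whole-sequence check: distinctness via set() plus comparison of the list with its sorted (or reverse-sorted) copy.
import Mathlib
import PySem

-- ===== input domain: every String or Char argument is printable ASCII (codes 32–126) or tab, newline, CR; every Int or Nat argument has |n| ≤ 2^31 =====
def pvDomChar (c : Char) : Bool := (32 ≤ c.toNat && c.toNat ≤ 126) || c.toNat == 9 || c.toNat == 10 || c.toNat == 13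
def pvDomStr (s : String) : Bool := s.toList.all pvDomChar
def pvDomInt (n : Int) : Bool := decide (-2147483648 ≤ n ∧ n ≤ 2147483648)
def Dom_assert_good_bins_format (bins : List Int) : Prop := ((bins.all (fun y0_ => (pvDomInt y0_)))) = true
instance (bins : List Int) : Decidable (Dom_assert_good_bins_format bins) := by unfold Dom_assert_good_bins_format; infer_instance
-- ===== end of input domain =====

-- B replaces A's direction-fixed single scan by a whole-sequence check (distinctness via set() +
-- comparison with the sorted / reverse-sorted copy); equally costly, more idiomatic.
-- ===== PORT A =====
-- A's asserts raise AssertionError; the port returns false there (outside Pre_).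
def pvALoop (asc : Bool) (last : Int) (rest : List Int) : Bool :=
  match rest with
  | [] => true
  | b :: bs =>
    if (if asc then decide (b > last) else decide (b < last)) then pvALoop asc b bs
    else false  -- assert fails

def assert_good_bins_format (bins : List Int) : Bool :=
  match bins with
  | b0 :: b1 :: rest =>
    if b0 = b1 then false  -- assert bins[0] != bins[1] fails
    else pvALoop (decide (b1 > b0)) b0 (b1 :: rest)
  | _ => false  -- assert len(bins) > 1 fails

-- ===== PORT B =====
def assert_good_bins_format_alt (bins : List Int) : Bool :=
  match bins with
  | [] => false  -- assert len(bins) > 1 fails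
  | [_] => false  -- assert len(bins) > 1 fails
  | b0 :: b1 :: _ =>
    if b0 = b1 then false  -- assert bins[0] != bins[1] fails
    else
      let seq := bins
      let distinct : Bool := (PySem.Set.ofList seq).length == seq.length
      if b1 > b0 then
        distinct && (seq == PySem.List.sorted seq (fun x => x) false)
      else
        distinct && (seq == PySem.List.sorted seq (fun x => x) true)

-- ===== PRECONDITION & SPEC =====
-- Pre_: exactly the inputs on which A returns (no AssertionError): at least two bins,
-- strictly increasing or strictly decreasing throughout.
def Pre_assert_good_bins_format (bins : List Int) : Prop :=
  bins.length > 1 ∧ (List.IsChain (· < ·) bins ∨ List.IsChain (· > ·) bins)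
instance (bins : List Int) : Decidable (Pre_assert_good_bins_format bins) := by
  unfold Pre_assert_good_bins_format; infer_instance
def pvWitness_assert_good_bins_format : List Int := [1, 3, 7]

def Spec_assert_good_bins_format (bins : List Int) (out : Bool) : Prop := out = assert_good_bins_format_alt bins
instance (bins : List Int) (out : Bool) : Decidable (Spec_assert_good_bins_format bins out) := by unfold Spec_assert_good_bins_format; infer_instance

-- ===== CLAIM (what is proved, stated in full; the proofs are below) =====
def Claim_equal_assert_good_bins_format : Prop := ∀ (bins : List Int), Dom_assert_good_bins_format bins → Pre_assert_good_bins_format bins → Spec_assert_good_bins_format bins (assert_good_bins_format bins)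

-- ===== LEMMAS AND PROOFS =====

theorem pvALoop_asc (l : List Int) : ∀ (last : Int),
    List.IsChain (· < ·) (last :: l) → pvALoop true last l = true := by
  induction l with
  | nil => intro last _; rfl
  | cons b bs ih =>
    intro last h
    rw [List.isChain_cons_cons] at h
    simp [pvALoop, h.1, ih b h.2]

theorem pvALoop_desc (l : List Int) : ∀ (last : Int),
    List.IsChain (· > ·) (last :: l) → pvALoop false last l = true := by
  induction l with
  | nil => intro last _; rfl
  | cons b bs ih =>
    intro last h
    rw [List.isChain_cons_cons] at h
    simp [pvALoop, h.1, ih b h.2]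

theorem alt_true_of_pairwise_lt (bins : List Int) (b0 b1 : Int) (rest : List Int)
    (he : bins = b0 :: b1 :: rest) (hp : bins.Pairwise (· < ·)) :
    assert_good_bins_format_alt bins = true := by
  subst he
  have hne : b0 ≠ b1 := by
    have := List.rel_of_pairwise_cons hp (List.mem_cons_self ..); omega
  have hlt : b1 > b0 := List.rel_of_pairwise_cons hp (List.mem_cons_self ..)
  have hnd : (b0 :: b1 :: rest).Nodup := hp.imp (fun h => by omega)
  have hsort : PySem.List.sorted (b0 :: b1 :: rest) (fun x => x) false = b0 :: b1 :: rest :=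
    PySem.List.sorted_eq_of_perm_of_pairwise_lt _ _ (fun x => x) (List.Perm.refl _) hp
  simp [assert_good_bins_format_alt, hne, hlt, hsort,
    PySem.Set.ofList_eq_self_of_nodup _ hnd]

theorem alt_true_of_pairwise_gt (bins : List Int) (b0 b1 : Int) (rest : List Int)
    (he : bins = b0 :: b1 :: rest) (hp : bins.Pairwise (· > ·)) :
    assert_good_bins_format_alt bins = true := by
  subst he
  have hgt : b0 > b1 := List.rel_of_pairwise_cons hp (List.mem_cons_self ..)
  have hne : b0 ≠ b1 := by omega
  have hnd : (b0 :: b1 :: rest).Nodup := hp.imp (fun h => by omega)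
  have hsort : PySem.List.sorted (b0 :: b1 :: rest) (fun x => x) true = b0 :: b1 :: rest :=
    PySem.List.sorted_rev_eq_of_perm_of_pairwise_gt _ _ (fun x => x) (List.Perm.refl _) hp
  simp [assert_good_bins_format_alt, hne, hgt, hsort,
    PySem.Set.ofList_eq_self_of_nodup _ hnd, show ¬ (b1 > b0) by omega]

-- ===== VERDICT (by name: the statement is the Claim_ definition above) =====
theorem assert_good_bins_format_spec : Claim_equal_assert_good_bins_format := by
  intro bins _ hpre
  obtain ⟨hlen, hchain⟩ := hpre
  match bins, hlen with
  | b0 :: b1 :: rest, _ =>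
    unfold Spec_assert_good_bins_format
    rcases hchain with hc | hc
    · have hlt : b0 < b1 := (List.isChain_cons_cons.mp hc).1
      have hA : assert_good_bins_format (b0 :: b1 :: rest) = true := by
        simp [assert_good_bins_format, show b0 ≠ b1 by omega, hlt,
          pvALoop_asc (b1 :: rest) b0 hc]
      rw [hA, alt_true_of_pairwise_lt _ b0 b1 rest rfl hc.pairwise]
    · have hgt : b0 > b1 := (List.isChain_cons_cons.mp hc).1
      have hA : assert_good_bins_format (b0 :: b1 :: rest) = true := by
        simp [assert_good_bins_format, show b0 ≠ b1 by omega,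
          show ¬ (b1 > b0) by omega, pvALoop_desc (b1 :: rest) b0 hc]
      rw [hA, alt_true_of_pairwise_gt _ b0 b1 rest rfl hc.pairwise]
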